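-- pv_equiv track=rewrite | github.com/pynucastro/pynucastro | pynucastro/rates/library.py | capitalize_rid
-- ===== SOURCE A (Python) =====
-- def capitalize_rid(rid, delimiter):
--     # Used to capitalize rid or fname given the delimiter
--     # delimiter is usually either "_" or " "
--
--     rid_nucs = rid.split(delimiter)
--     rid_mod = []
--     do_capitalization = True
--     for n in rid_nucs:
--         if n in ("weak", "approx", "derived"):
--             do_capitalization = False
--         if do_capitalization:
--             if n not in ("n", "p"):
--                 n = n.capitalize()
--         rid_mod.append(n)
--
--     rid_mod = delimiter.join(rid_mod)
--     return rid_mod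
-- ===== SOURCE B (Python) =====
-- def capitalize_rid(rid, delimiter):
--     tokens = rid.split(delimiter)
--     cut = next((i for i, t in enumerate(tokens)
--                 if t in ("weak", "approx", "derived")), len(tokens))
--     head = [t if t in ("n", "p") else t.capitalize() for t in tokens[:cut]]
--     return delimiter.join(head + tokens[cut:])
-- ===== Notes on version B (the rewrite author's own statement) =====
-- stated objective: simpler
-- what changed: Replaces the threaded do_capitalization flag loop with an explicit boundary: find the index of the first weak/approx/derived keyword, capitalize the tokens before it (leaving 'n'/'p' alone), and append the rest verbatim. Pre_ excludes delimiter == '', where both raise ValueError.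
import Mathlib
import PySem

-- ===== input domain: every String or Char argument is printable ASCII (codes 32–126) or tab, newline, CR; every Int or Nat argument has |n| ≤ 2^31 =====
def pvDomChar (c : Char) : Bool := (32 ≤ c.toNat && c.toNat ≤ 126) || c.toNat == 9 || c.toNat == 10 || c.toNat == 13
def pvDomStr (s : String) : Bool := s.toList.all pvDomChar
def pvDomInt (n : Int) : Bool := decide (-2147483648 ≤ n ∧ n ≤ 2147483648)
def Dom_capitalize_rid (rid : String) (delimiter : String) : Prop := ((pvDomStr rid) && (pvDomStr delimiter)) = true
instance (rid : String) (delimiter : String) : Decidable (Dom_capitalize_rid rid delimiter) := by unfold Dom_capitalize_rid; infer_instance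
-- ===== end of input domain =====

-- B replaces A's threaded do_capitalization flag with an explicit keyword boundary index
-- (simpler decomposition, same cost). Return value only; neither mutates its arguments.

-- str.capitalize(): first character uppercased, the rest lowercased (exact on ASCII).
def pyCapitalize (s : String) : String :=
  match s.toList with
  | [] => s
  | c :: rest => String.mk (PySem.Chars.upperChar c :: PySem.Chars.lower rest)

-- ===== PORT A =====
-- the loop over rid_nucs, threading the do_capitalization flag and the accumulated list
def capAloop : List String → Bool → List String
  | [], _ => []
  | n :: ts, cap =>
    let cap := if n == "weak" || n == "approx" || n == "derived" then false else cap
    let n' := if cap then (if n == "n" || n == "p" then n else pyCapitalize n) else n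
    n' :: capAloop ts cap

def capitalize_rid (rid : String) (delimiter : String) : String :=
  match PySem.Str.split? rid delimiter with
  | none => ""  -- delimiter = "": rid.split raises ValueError; excluded by Pre_
  | some rid_nucs => PySem.Str.join delimiter (capAloop rid_nucs true)

-- ===== PORT B =====
def isKeyword (t : String) : Bool := t == "weak" || t == "approx" || t == "derived"

def capTok (t : String) : String := if t == "n" || t == "p" then t else pyCapitalize t

def capitalize_rid_alt (rid : String) (delimiter : String) : String :=
  match PySem.Str.split? rid delimiter with
  | none => ""  -- delimiter = "": rid.split raises ValueError; excluded by Pre_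
  | some tokens =>
    let cut := (tokens.findIdx? isKeyword).getD tokens.length
    PySem.Str.join delimiter ((tokens.take cut).map capTok ++ tokens.drop cut)

-- ===== PRECONDITION & SPEC =====
-- Pre_ excludes delimiter = "": there rid.split(delimiter) raises ValueError in A (and in B).
def Pre_capitalize_rid (rid : String) (delimiter : String) : Prop := delimiter ≠ ""
instance (rid : String) (delimiter : String) : Decidable (Pre_capitalize_rid rid delimiter) := by unfold Pre_capitalize_rid; infer_instance
def pvWitness_capitalize_rid : String × String := ("p_he4_c12_weak_xx", "_")

def Spec_capitalize_rid (rid : String) (delimiter : String) (out : String) : Prop := out = capitalize_rid_alt rid delimiter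
instance (rid : String) (delimiter : String) (out : String) : Decidable (Spec_capitalize_rid rid delimiter out) := by unfold Spec_capitalize_rid; infer_instance

-- ===== CLAIM (what is proved, stated in full; the proofs are below) =====
def Claim_equal_capitalize_rid : Prop := ∀ (rid : String) (delimiter : String), Dom_capitalize_rid rid delimiter → Pre_capitalize_rid rid delimiter → Spec_capitalize_rid rid delimiter (capitalize_rid rid delimiter)

-- ===== LEMMAS AND PROOFS =====

-- once the flag is false, A's loop returns the tokens unchanged
theorem capAloop_false (ts : List String) : capAloop ts false = ts := by
  induction ts with
  | nil => rfl
  | cons t ts ih => simp [capAloop, ih]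

-- A's loop with the flag on equals B's split at the first keyword
theorem capAloop_true (ts : List String) :
    capAloop ts true =
      (ts.take ((ts.findIdx? isKeyword).getD ts.length)).map capTok ++
        ts.drop ((ts.findIdx? isKeyword).getD ts.length) := by
  induction ts with
  | nil => rfl
  | cons t ts ih =>
    by_cases hk : isKeyword t = true
    · have hk' : (t == "weak" || t == "approx" || t == "derived") = true := hk
      simp [capAloop, hk', capAloop_false, List.findIdx?_cons, hk]
    · have hk' : (t == "weak" || t == "approx" || t == "derived") = false := by
        simpa [isKeyword] using hk
      simp only [capAloop, hk', List.findIdx?_cons, hk]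
      cases h : ts.findIdx? isKeyword with
      | none =>
        simp [h, capTok] at ih ⊢
        exact ih
      | some k =>
        simp [h, capTok] at ih ⊢
        exact ih

-- ===== VERDICT (by name: the statement is the Claim_ definition above) =====
theorem capitalize_rid_spec : Claim_equal_capitalize_rid := by
  intro rid delimiter _ _
  unfold Spec_capitalize_rid capitalize_rid capitalize_rid_alt
  cases PySem.Str.split? rid delimiter with
  | none => rfl
  | some ts => simp only [capAloop_true]
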